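-- pv_equiv track=rewrite | github.com/joannadengdeng/mmit | scripts/run_method.py | _extract_short_answer
-- ===== SOURCE A (Python) =====
-- def _extract_short_answer(text):
--     """Extract first short answer from model output.
--
--     Models often output "Yes, there is a snowboard in the image."
--     We want just "Yes" for POPE-style benchmarks.
--     """
--     text = text.strip()
--     if not text:
--         return text
--     # For yes/no: take first word
--     first_word = text.split()[0].lower().rstrip(".,!?;:")
--     if first_word in ("yes", "no"):
--         return first_word
--     # Otherwise: take up to first period/comma (strip explanations)
--     for sep in ['.', ',', '\n']:
--         if sep in text:
--             text = text[:text.index(sep)].strip()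
--     return text
-- ===== SOURCE B (Python) =====
-- def _extract_short_answer(text):
--     """Extract first short answer from model output.
--
--     Same strip/empty guard and yes/no first-word branch as before; the
--     explanation-stripping tail is a single left-to-right scan that cuts at the
--     first '.', ',' or '\n' instead of three cumulative truncate-and-rescan passes.
--     """
--     text = text.strip()
--     if not text:
--         return text
--     first_word = text.split()[0].lower().rstrip(".,!?;:")
--     if first_word in ("yes", "no"):
--         return first_word
--     for i, ch in enumerate(text):
--         if ch in ".,\n":
--             return text[:i].strip()
--     return text
-- ===== Notes on version B (the rewrite author's own statement) =====
-- stated objective: alternative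
-- what changed: The explanation-stripping tail no longer truncates and re-scans the text cumulatively for each of the three separators in turn (three membership tests, three index scans, up to three strips); B makes one left-to-right character scan, cuts once at the earliest separator and strips once.
import Mathlib
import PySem

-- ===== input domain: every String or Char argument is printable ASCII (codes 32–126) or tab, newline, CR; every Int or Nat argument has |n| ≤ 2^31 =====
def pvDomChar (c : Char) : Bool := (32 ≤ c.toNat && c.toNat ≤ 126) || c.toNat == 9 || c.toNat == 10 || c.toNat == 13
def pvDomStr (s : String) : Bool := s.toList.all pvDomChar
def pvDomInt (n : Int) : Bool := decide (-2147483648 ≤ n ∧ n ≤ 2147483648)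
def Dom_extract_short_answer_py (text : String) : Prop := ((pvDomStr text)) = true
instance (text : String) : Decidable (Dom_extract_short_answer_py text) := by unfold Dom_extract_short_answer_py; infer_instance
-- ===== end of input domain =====

-- B replaces A's cumulative truncate-and-rescan over the three separators by a single
-- left-to-right scan that cuts once at the earliest separator (objective: alternative).

-- ===== PORT A =====

-- hand port of Python str.rstrip(chars): drop trailing characters that occur in `chars` (exact)
def pvRstripChars (s chars : List Char) : List Char :=
  (s.reverse.dropWhile (fun c => chars.contains c)).reverse

-- shared line of both Pythons: first_word = text.split()[0].lower().rstrip(".,!?;:")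
-- (the `none` branch is unreachable: split() of a nonempty stripped text is nonempty,
--  so Python's `[0]` never raises)
def pvFirstWord (t : List Char) : List Char :=
  match PySem.List.pyGet? (PySem.Chars.split₀ t) 0 with
  | none => []
  | some w => pvRstripChars (PySem.Chars.lower w) ".,!?;:".toList

-- body of A's loop: `if sep in text: text = text[:text.index(sep)].strip()`
def pvAStep (cur : List Char) (sep : Char) : List Char :=
  if PySem.Chars.isIn [sep] cur then
    PySem.Chars.strip (PySem.List.slice cur none (some (PySem.Chars.find cur [sep])))
  else cur

def extract_short_answer_py (text : String) : String :=
  let t := PySem.Chars.strip text.toList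
  if t = [] then String.ofList t
  else
    let fw := pvFirstWord t
    if fw = "yes".toList ∨ fw = "no".toList then String.ofList fw
    else String.ofList (List.foldl pvAStep t ['.', ',', '\n'])

-- ===== PORT B =====

-- `ch in ".,\n"` for a single character ch (exact)
def pvIsSep (c : Char) : Bool := c == '.' || c == ',' || c == '\n'

-- B's loop `for i, ch in enumerate(text): if ch in ".,\n": return text[:i].strip()`
def pvBGo (whole : List Char) : List Char → Nat → List Char
  | [], _ => whole
  | c :: r, i => if pvIsSep c then PySem.Chars.strip (whole.take i) else pvBGo whole r (i + 1)

def extract_short_answer_py_alt (text : String) : String :=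
  let t := PySem.Chars.strip text.toList
  if t = [] then String.ofList t
  else
    let fw := pvFirstWord t
    if fw = "yes".toList ∨ fw = "no".toList then String.ofList fw
    else String.ofList (pvBGo t t 0)

-- ===== PRECONDITION & SPEC =====
def Spec_extract_short_answer_py (text : String) (out : String) : Prop := out = extract_short_answer_py_alt text
instance (text : String) (out : String) : Decidable (Spec_extract_short_answer_py text out) := by unfold Spec_extract_short_answer_py; infer_instance

-- ===== CLAIM (what is proved, stated in full; the proofs are below) =====
def Claim_equal_extract_short_answer_py : Prop := ∀ (text : String), Dom_extract_short_answer_py text → Spec_extract_short_answer_py text (extract_short_answer_py text)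

-- ===== LEMMAS AND PROOFS =====

-- abbreviation used throughout: whitespace predicate
-- (we reason about PySem.Chars.strip = rstrip ∘ lstrip on List Char)

-- a prefix of a list without leading whitespace has no leading whitespace
lemma pv_lstrip_of_prefix {y z : List Char} (hy : List.dropWhile PySem.Chars.isspace y = y)
    (hz : z <+: y) : List.dropWhile PySem.Chars.isspace z = z := by
  rw [List.dropWhile_eq_self_iff] at hy ⊢
  intro hl
  have hlen : 0 < y.length := lt_of_lt_of_le hl (List.IsPrefix.length_le hz)
  rw [List.IsPrefix.getElem hz hl]
  exact hy hlen

lemma pv_rstrip_prefix (y : List Char) : PySem.Chars.rstrip y <+: y := by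
  unfold PySem.Chars.rstrip
  conv_rhs => rw [← y.reverse_reverse]
  exact List.reverse_prefix.2 (List.dropWhile_suffix _)

-- strip unfolded once: strip m = rstrip (dropWhile isspace m)
lemma pv_strip_def (m : List Char) :
    PySem.Chars.strip m = PySem.Chars.rstrip (List.dropWhile PySem.Chars.isspace m) := rfl

lemma pv_lstrip_strip (m : List Char) :
    List.dropWhile PySem.Chars.isspace (PySem.Chars.strip m) = PySem.Chars.strip m := by
  rw [pv_strip_def]
  exact pv_lstrip_of_prefix (List.dropWhile_idempotent _ m) (pv_rstrip_prefix _)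

lemma pv_rstrip_idem (m : List Char) : PySem.Chars.rstrip (PySem.Chars.rstrip m) = PySem.Chars.rstrip m := by
  unfold PySem.Chars.rstrip
  simp [List.dropWhile_idempotent]

lemma pv_strip_idem (m : List Char) : PySem.Chars.strip (PySem.Chars.strip m) = PySem.Chars.strip m := by
  rw [pv_strip_def (m := PySem.Chars.strip m), pv_lstrip_strip, pv_strip_def, pv_rstrip_idem,
    ← pv_strip_def]

-- decomposition m = rstrip m ++ (all-whitespace tail)
lemma pv_rstrip_decomp (m : List Char) :
    m = PySem.Chars.rstrip m ++ (m.reverse.takeWhile PySem.Chars.isspace).reverse ∧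
    ∀ c ∈ (m.reverse.takeWhile PySem.Chars.isspace).reverse, PySem.Chars.isspace c = true := by
  constructor
  · conv_lhs => rw [← m.reverse_reverse, ← List.takeWhile_append_dropWhile
      (p := PySem.Chars.isspace) (l := m.reverse)]
    rw [List.reverse_append]
    rfl
  · intro c hc
    exact List.mem_takeWhile_imp (by simpa using hc)

lemma pv_rstrip_append_ws {x y : List Char} (hy : ∀ c ∈ y, PySem.Chars.isspace c = true) :
    PySem.Chars.rstrip (x ++ y) = PySem.Chars.rstrip x := by
  unfold PySem.Chars.rstrip
  rw [List.reverse_append, List.dropWhile_append]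
  have : List.dropWhile PySem.Chars.isspace y.reverse = [] :=
    List.dropWhile_eq_nil_iff.2 (by intro c hc; exact hy c (by simpa using hc))
  simp [this]

lemma pv_strip_append_ws {x y : List Char} (hy : ∀ c ∈ y, PySem.Chars.isspace c = true) :
    PySem.Chars.strip (x ++ y) = PySem.Chars.strip x := by
  rw [pv_strip_def, pv_strip_def, List.dropWhile_append]
  by_cases hx : List.dropWhile PySem.Chars.isspace x = []
  · have hyn : List.dropWhile PySem.Chars.isspace y = [] :=
      List.dropWhile_eq_nil_iff.2 (by intro c hc; exact hy c hc)
    simp [hx, hyn]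
  · rw [if_neg (by simp [List.isEmpty_iff, hx])]
    exact pv_rstrip_append_ws hy

-- MASTER lemma: for a list without leading whitespace, stripping before a takeWhile cut
-- does not change the stripped result of the cut
lemma pv_master (q : Char → Bool) {m : List Char}
    (hm : List.dropWhile PySem.Chars.isspace m = m) :
    PySem.Chars.strip ((PySem.Chars.strip m).takeWhile q) =
      PySem.Chars.strip (m.takeWhile q) := by
  have hsm : PySem.Chars.strip m = PySem.Chars.rstrip m := by
    unfold PySem.Chars.strip PySem.Chars.lstrip; rw [hm]
  obtain ⟨hdec, hws⟩ := pv_rstrip_decomp m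
  by_cases he : (PySem.Chars.rstrip m).takeWhile q = PySem.Chars.rstrip m
  · conv_rhs => rw [hdec]
    rw [List.takeWhile_append, if_pos (by rw [he])]
    rw [hsm, he]
    rw [pv_strip_append_ws (fun c hc => hws c ((List.takeWhile_prefix _).subset hc))]
  · conv_rhs => rw [hdec]
    rw [List.takeWhile_append, if_neg, hsm]
    intro hlen
    exact he (List.IsPrefix.eq_of_length (List.takeWhile_prefix q) hlen)

-- find.go on a single-character needle
lemma pv_findgo_singleton (c : Char) : ∀ (l : List Char) (k : Nat),
    PySem.Chars.find.go [c] l k =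
      if c ∈ l then ((k : Int) + ((l.takeWhile (fun d => d != c)).length : Int)) else -1 := by
  intro l
  induction l with
  | nil => intro k; simp [PySem.Chars.find.go]
  | cons h t ih =>
    intro k
    by_cases hc : h = c
    · subst hc
      simp [PySem.Chars.find.go, List.isPrefixOf]
    · have hc' : c ≠ h := Ne.symm hc
      have hpre : [c].isPrefixOf (h :: t) = false := by
        simp [List.isPrefixOf, hc']
      rw [PySem.Chars.find.go, hpre]
      simp only [Bool.false_eq_true, if_false, ih (k + 1)]
      by_cases hm : c ∈ t
      · rw [if_pos hm, if_pos (by simp [List.mem_cons, hm])]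
        rw [List.takeWhile_cons, if_pos (by simp only [bne_iff_ne, ne_eq]; simp [hc])]
        simp; ring
      · rw [if_neg hm, if_neg (by simp [List.mem_cons, hc', hm])]

-- A's loop step, characterised on a stripped input
lemma pv_step_eq (c : Char) {m : List Char}
    (hm : List.dropWhile PySem.Chars.isspace m = m) :
    pvAStep (PySem.Chars.strip m) c = PySem.Chars.strip (m.takeWhile (fun d => d != c)) := by
  unfold pvAStep
  by_cases hc : c ∈ PySem.Chars.strip m
  · rw [if_pos (by rw [PySem.Chars.isIn_iff_infix]; exact (List.singleton_infix_iff c _).2 hc)]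
    have hfind : PySem.Chars.find (PySem.Chars.strip m) [c] =
        (((PySem.Chars.strip m).takeWhile (fun d => d != c)).length : Int) := by
      rw [PySem.Chars.find, pv_findgo_singleton, if_pos hc]; simp
    rw [hfind, PySem.List.slice_to _ (by positivity), Int.toNat_natCast]
    rw [← List.prefix_iff_eq_take.1 (List.takeWhile_prefix _)]
    exact pv_master _ hm
  · rw [if_neg (by
      rw [PySem.Chars.isIn_iff_infix]
      intro hinf
      exact hc ((List.singleton_infix_iff c _).1 hinf)), ← pv_master _ hm]
    rw [List.takeWhile_eq_self_iff.2 (by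
      intro x hx
      simp only [bne_iff_ne, ne_eq]
      exact fun hxc => hc (hxc ▸ hx))]
    exact (pv_strip_idem m).symm

-- chaining the three steps of A's loop
lemma pv_a_loop (t : List Char) (ht : PySem.Chars.strip t = t) :
    List.foldl pvAStep t ['.', ',', '\n'] =
      PySem.Chars.strip (t.takeWhile (fun c => !pvIsSep c)) := by
  have hl : List.dropWhile PySem.Chars.isspace t = t := by
    conv_lhs => rw [← ht]
    rw [pv_lstrip_strip, ht]
  have hl1 : List.dropWhile PySem.Chars.isspace (t.takeWhile (fun d => d != '.')) =
      t.takeWhile (fun d => d != '.') :=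
    pv_lstrip_of_prefix hl (List.takeWhile_prefix _)
  have hl2 : List.dropWhile PySem.Chars.isspace
      ((t.takeWhile (fun d => d != '.')).takeWhile (fun d => d != ',')) = _ :=
    pv_lstrip_of_prefix hl1 (List.takeWhile_prefix _)
  simp only [List.foldl_cons, List.foldl_nil]
  have e1 : pvAStep t '.' = PySem.Chars.strip (t.takeWhile (fun d => d != '.')) := by
    conv_lhs => rw [← ht]
    exact pv_step_eq '.' hl
  rw [e1, pv_step_eq ',' hl1, pv_step_eq '\n' hl2]
  congr 1
  rw [List.takeWhile_takeWhile, List.takeWhile_takeWhile]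
  congr 1
  funext a
  by_cases h1 : a = '.' <;> by_cases h2 : a = ',' <;> by_cases h3 : a = '\n' <;>
    simp [pvIsSep, h1, h2, h3]

-- B's scan, characterised
lemma pv_bgo_spec : ∀ (suf pre : List Char),
    pvBGo (pre ++ suf) suf pre.length =
      if suf.any pvIsSep then PySem.Chars.strip (pre ++ suf.takeWhile (fun c => !pvIsSep c))
      else pre ++ suf := by
  intro suf
  induction suf with
  | nil => intro pre; simp [pvBGo]
  | cons c r ih =>
    intro pre
    rw [pvBGo]
    by_cases hc : pvIsSep c = true
    · rw [if_pos hc, List.take_left]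
      rw [if_pos (by simp [List.any_cons, hc])]
      rw [List.takeWhile_cons, if_neg (by simp [hc])]
      simp
    · rw [if_neg hc]
      have h1 : pre ++ c :: r = (pre ++ [c]) ++ r := by simp
      have h2 : pre.length + 1 = (pre ++ [c]).length := by simp
      rw [h1, h2, ih (pre ++ [c])]
      have hany : (c :: r).any pvIsSep = r.any pvIsSep := by
        simp [List.any_cons, hc]
      rw [hany]
      by_cases hr : r.any pvIsSep = true
      · rw [if_pos hr, if_pos hr]
        simp [hc]
      · rw [if_neg hr, if_neg hr]

-- the two tail computations agree on a stripped text
lemma pv_tails_eq (t : List Char) (ht : PySem.Chars.strip t = t) :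
    List.foldl pvAStep t ['.', ',', '\n'] = pvBGo t t 0 := by
  have hb := pv_bgo_spec t []
  simp only [List.nil_append, List.length_nil] at hb
  rw [hb, pv_a_loop t ht]
  by_cases ha : t.any pvIsSep = true
  · rw [if_pos ha]
  · rw [if_neg ha]
    rw [List.takeWhile_eq_self_iff.2 (by
      intro x hx
      cases hps : pvIsSep x
      · simp
      · exact absurd (List.any_eq_true.2 ⟨x, hx, hps⟩) ha), ht]

-- ===== VERDICT (by name: the statement is the Claim_ definition above) =====
theorem extract_short_answer_py_spec : Claim_equal_extract_short_answer_py := by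
  intro text _
  unfold Spec_extract_short_answer_py extract_short_answer_py extract_short_answer_py_alt
  simp only
  by_cases h0 : PySem.Chars.strip text.toList = []
  · rw [if_pos h0, if_pos h0]
  · rw [if_neg h0, if_neg h0]
    by_cases hfw : pvFirstWord (PySem.Chars.strip text.toList) = "yes".toList ∨
        pvFirstWord (PySem.Chars.strip text.toList) = "no".toList
    · rw [if_pos hfw, if_pos hfw]
    · rw [if_neg hfw, if_neg hfw]
      rw [pv_tails_eq _ (pv_strip_idem text.toList)]
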